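-- pv_equiv track=rewrite | github.com/osbetel/LeetCode | roblox.py | rateLimiter
-- ===== SOURCE A (Python) =====
-- def rateLimiter(requestTimestamps, windowLength, maxInWindow):
--     result = []
--     allowed_requests = []
--
--     for timestamp in requestTimestamps:
--         # Count allowed requests within current window
--         count = 0
--         for allowed_time in allowed_requests:
--             if allowed_time >= timestamp - windowLength + 1:
--                 count += 1
--
--         # Check if current request can be allowed
--         if count < maxInWindow:
--             result.append(True)
--             allowed_requests.append(timestamp)
--         else:
--             result.append(False)
--
--     return result
-- ===== SOURCE B (Python) =====
-- def rateLimiter(requestTimestamps, windowLength, maxInWindow):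
--     # Sorted list of allowed timestamps + hand-written binary searches:
--     # count of allowed timestamps >= threshold is len - bisect_left(threshold).
--     result = []
--     allowed_sorted = []
--     for t in requestTimestamps:
--         thr = t - windowLength + 1
--         lo, hi = 0, len(allowed_sorted)
--         while lo < hi:
--             mid = (lo + hi) // 2
--             if allowed_sorted[mid] < thr:
--                 lo = mid + 1
--             else:
--                 hi = mid
--         if len(allowed_sorted) - lo < maxInWindow:
--             result.append(True)
--             lo2, hi2 = 0, len(allowed_sorted)
--             while lo2 < hi2:
--                 mid = (lo2 + hi2) // 2
--                 if allowed_sorted[mid] <= t: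
--                     lo2 = mid + 1
--                 else:
--                     hi2 = mid
--             allowed_sorted.insert(lo2, t)
--         else:
--             result.append(False)
--     return result
-- ===== Notes on version B (the rewrite author's own statement) =====
-- stated objective: faster
-- what changed: Replaces the per-request linear scan over all previously allowed timestamps by a sorted list with hand-written binary search: count of allowed timestamps >= threshold is len - bisect_left(threshold), and an allowed timestamp is inserted at its bisect_right position.
import Mathlib
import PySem

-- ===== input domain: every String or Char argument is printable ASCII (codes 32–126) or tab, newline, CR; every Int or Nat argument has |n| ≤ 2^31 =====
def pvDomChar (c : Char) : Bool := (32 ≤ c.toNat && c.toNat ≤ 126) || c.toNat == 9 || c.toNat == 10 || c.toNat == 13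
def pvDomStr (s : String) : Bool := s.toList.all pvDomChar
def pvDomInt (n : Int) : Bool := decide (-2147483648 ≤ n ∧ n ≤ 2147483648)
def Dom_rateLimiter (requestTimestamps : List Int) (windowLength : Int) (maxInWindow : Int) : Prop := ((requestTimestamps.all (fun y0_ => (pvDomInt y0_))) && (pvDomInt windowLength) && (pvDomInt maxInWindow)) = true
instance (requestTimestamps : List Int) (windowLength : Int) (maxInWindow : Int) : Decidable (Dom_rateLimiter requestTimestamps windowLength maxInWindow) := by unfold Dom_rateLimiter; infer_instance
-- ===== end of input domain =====

-- B replaces A's per-request linear scan of all allowed timestamps by a sorted list with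
-- binary searches (count of allowed ≥ threshold = length - bisect_left); objective: faster.

-- ===== PORT A =====
def rateLimiter (requestTimestamps : List Int) (windowLength : Int) (maxInWindow : Int) : List Bool :=
  (requestTimestamps.foldl
    (fun (st : List Bool × List Int) timestamp =>
      let count : Int :=
        st.2.foldl (fun c allowed_time =>
          if allowed_time ≥ timestamp - windowLength + 1 then c + 1 else c) 0
      if count < maxInWindow then (st.1 ++ [true], st.2 ++ [timestamp])
      else (st.1 ++ [false], st.2))
    ([], [])).1

-- ===== PORT B =====
-- hand-written binary search "while lo < hi" loops of Source B, ported with a fuel bound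
-- (each iteration shrinks hi - lo, so fuel = initial hi suffices)
def pvBisectLeft (l : List Int) (x : Int) : Nat → Nat → Nat → Nat
  | 0, lo, _hi => lo
  | fuel + 1, lo, hi =>
    if lo < hi then
      let mid := (lo + hi) / 2
      if l.getD mid 0 < x then pvBisectLeft l x fuel (mid + 1) hi
      else pvBisectLeft l x fuel lo mid
    else lo

def pvBisectRight (l : List Int) (x : Int) : Nat → Nat → Nat → Nat
  | 0, lo, _hi => lo
  | fuel + 1, lo, hi =>
    if lo < hi then
      let mid := (lo + hi) / 2
      if l.getD mid 0 ≤ x then pvBisectRight l x fuel (mid + 1) hi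
      else pvBisectRight l x fuel lo mid
    else lo

def rateLimiter_alt (requestTimestamps : List Int) (windowLength : Int) (maxInWindow : Int) : List Bool :=
  (requestTimestamps.foldl
    (fun (st : List Bool × List Int) t =>
      let thr := t - windowLength + 1
      let lo := pvBisectLeft st.2 thr st.2.length 0 st.2.length
      if ((st.2.length : Int) - (lo : Int)) < maxInWindow then
        (st.1 ++ [true], st.2.insertIdx (pvBisectRight st.2 t st.2.length 0 st.2.length) t)
      else (st.1 ++ [false], st.2))
    ([], [])).1

-- ===== PRECONDITION & SPEC =====
def Spec_rateLimiter (requestTimestamps : List Int) (windowLength : Int) (maxInWindow : Int) (out : List Bool) : Prop := out = rateLimiter_alt requestTimestamps windowLength maxInWindow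
instance (requestTimestamps : List Int) (windowLength : Int) (maxInWindow : Int) (out : List Bool) : Decidable (Spec_rateLimiter requestTimestamps windowLength maxInWindow out) := by unfold Spec_rateLimiter; infer_instance

-- ===== CLAIM (what is proved, stated in full; the proofs are below) =====
def Claim_equal_rateLimiter : Prop := ∀ (requestTimestamps : List Int) (windowLength : Int) (maxInWindow : Int), Dom_rateLimiter requestTimestamps windowLength maxInWindow → Spec_rateLimiter requestTimestamps windowLength maxInWindow (rateLimiter requestTimestamps windowLength maxInWindow)

-- ===== LEMMAS AND PROOFS =====

-- A's inner counting loop computes countP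
theorem pvCountFold (thr : Int) (l : List Int) (c : Int) :
    l.foldl (fun c a => if a ≥ thr then c + 1 else c) c
      = c + (l.countP (fun a => decide (a ≥ thr)) : Int) := by
  induction l generalizing c with
  | nil => simp
  | cons a l ih =>
    simp only [List.foldl_cons, List.countP_cons, ih]
    by_cases h : a ≥ thr
    · simp [h]; ring
    · simp [h]

theorem pvGetD_mono (l : List Int) (hs : l.Pairwise (· ≤ ·)) (i j : Nat)
    (hij : i ≤ j) (hj : j < l.length) : l.getD i 0 ≤ l.getD j 0 := by
  have hi : i < l.length := by omega
  rw [List.getD_eq_getElem?_getD, List.getD_eq_getElem?_getD,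
    List.getElem?_eq_getElem hi, List.getElem?_eq_getElem hj]
  rcases Nat.lt_or_ge i j with h | h
  · exact (List.pairwise_iff_getElem.mp hs) i j hi hj h
  · have : i = j := by omega
    subst this; simp

theorem pvBisectLeft_spec (l : List Int) (x : Int) (hs : l.Pairwise (· ≤ ·)) :
    ∀ (fuel lo hi : Nat), hi - lo ≤ fuel → lo ≤ hi → hi ≤ l.length →
      (∀ i, i < lo → l.getD i 0 < x) →
      (∀ i, hi ≤ i → i < l.length → ¬ l.getD i 0 < x) →
      lo ≤ pvBisectLeft l x fuel lo hi ∧ pvBisectLeft l x fuel lo hi ≤ hi ∧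
        (∀ i, i < pvBisectLeft l x fuel lo hi → l.getD i 0 < x) ∧
        (∀ i, pvBisectLeft l x fuel lo hi ≤ i → i < l.length → ¬ l.getD i 0 < x) := by
  intro fuel
  induction fuel with
  | zero =>
    intro lo hi hn hlohi hhil hbelow habove
    have : lo = hi := by omega
    subst this
    exact ⟨le_refl _, le_refl _, hbelow, habove⟩
  | succ fuel ih =>
    intro lo hi hn hlohi hhil hbelow habove
    by_cases hlt : lo < hi
    · set mid := (lo + hi) / 2 with hmid
      have hml : mid < l.length := by omega
      by_cases hcond : l.getD mid 0 < x
      · have hrec := ih (mid + 1) hi (by omega) (by omega) hhil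
          (fun i hi' => by
            rcases Nat.lt_or_ge i lo with h | h
            · exact hbelow i h
            · exact lt_of_le_of_lt (pvGetD_mono l hs i mid (by omega) hml) hcond)
          habove
        simp only [pvBisectLeft, hlt, if_true, ← hmid, hcond]
        exact ⟨by omega, hrec.2.1, hrec.2.2⟩
      · have hrec := ih lo mid (by omega) (by omega) (by omega) hbelow
          (fun i hi' hil => fun hc =>
            hcond (lt_of_le_of_lt (pvGetD_mono l hs mid i hi' hil) hc))
        simp only [pvBisectLeft, hlt, if_true, ← hmid, hcond, if_false]
        exact ⟨hrec.1, by omega, hrec.2.2⟩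
    · have : lo = hi := by omega
      subst this
      simp only [pvBisectLeft, hlt, if_false]
      exact ⟨le_refl _, le_refl _, hbelow, habove⟩

theorem pvBisectRight_spec (l : List Int) (x : Int) (hs : l.Pairwise (· ≤ ·)) :
    ∀ (fuel lo hi : Nat), hi - lo ≤ fuel → lo ≤ hi → hi ≤ l.length →
      (∀ i, i < lo → l.getD i 0 ≤ x) →
      (∀ i, hi ≤ i → i < l.length → ¬ l.getD i 0 ≤ x) →
      lo ≤ pvBisectRight l x fuel lo hi ∧ pvBisectRight l x fuel lo hi ≤ hi ∧
        (∀ i, i < pvBisectRight l x fuel lo hi → l.getD i 0 ≤ x) ∧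
        (∀ i, pvBisectRight l x fuel lo hi ≤ i → i < l.length → ¬ l.getD i 0 ≤ x) := by
  intro fuel
  induction fuel with
  | zero =>
    intro lo hi hn hlohi hhil hbelow habove
    have : lo = hi := by omega
    subst this
    exact ⟨le_refl _, le_refl _, hbelow, habove⟩
  | succ fuel ih =>
    intro lo hi hn hlohi hhil hbelow habove
    by_cases hlt : lo < hi
    · set mid := (lo + hi) / 2 with hmid
      have hml : mid < l.length := by omega
      by_cases hcond : l.getD mid 0 ≤ x
      · have hrec := ih (mid + 1) hi (by omega) (by omega) hhil
          (fun i hi' => by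
            rcases Nat.lt_or_ge i lo with h | h
            · exact hbelow i h
            · exact le_trans (pvGetD_mono l hs i mid (by omega) hml) hcond)
          habove
        simp only [pvBisectRight, hlt, if_true, ← hmid, hcond]
        exact ⟨by omega, hrec.2.1, hrec.2.2⟩
      · have hrec := ih lo mid (by omega) (by omega) (by omega) hbelow
          (fun i hi' hil => fun hc =>
            hcond (le_trans (pvGetD_mono l hs mid i hi' hil) hc))
        simp only [pvBisectRight, hlt, if_true, ← hmid, hcond, if_false]
        exact ⟨hrec.1, by omega, hrec.2.2⟩
    · have : lo = hi := by omega
      subst this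
      simp only [pvBisectRight, hlt, if_false]
      exact ⟨le_refl _, le_refl _, hbelow, habove⟩

theorem pvGetD_eq (l : List Int) (i : Nat) (h : i < l.length) : l.getD i 0 = l[i] := by
  simp [List.getD_eq_getElem?_getD, List.getElem?_eq_getElem h]

-- from the index characterisation to countP
theorem pvCount_of_split (p : Int → Bool) (l : List Int) (r : Nat) (hr : r ≤ l.length)
    (h1 : ∀ i, i < r → ∀ h : i < l.length, p l[i] = true)
    (h2 : ∀ i, r ≤ i → ∀ h : i < l.length, p l[i] = false) :
    l.countP p = r := by
  have hsplit : l = l.take r ++ l.drop r := (List.take_append_drop r l).symm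
  conv_lhs => rw [hsplit]
  rw [List.countP_append]
  have htake : (l.take r).countP p = (l.take r).length := by
    rw [List.countP_eq_length]
    intro a ha
    obtain ⟨i, hi, hget⟩ := List.mem_iff_getElem.mp ha
    have hir : i < r := by have := hi; simp [List.length_take] at this; omega
    have hil : i < l.length := by have := hi; simp [List.length_take] at this; omega
    have : a = l[i] := by rw [← hget]; simp [List.getElem_take]
    rw [this]; exact h1 i hir hil
  have hdrop : (l.drop r).countP p = 0 := by
    rw [List.countP_eq_zero]
    intro a ha
    obtain ⟨i, hi, hget⟩ := List.mem_iff_getElem.mp ha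
    have hil : r + i < l.length := by have := hi; simp [List.length_drop] at this; omega
    have : a = l[r + i] := by rw [← hget]; simp [List.getElem_drop]
    rw [this]; simp [h2 (r + i) (by omega) hil]
  rw [htake, hdrop, List.length_take]
  omega

theorem pvInsertIdx_eq (t : Int) (r : Nat) :
    ∀ (l : List Int), r ≤ l.length → l.insertIdx r t = l.take r ++ t :: l.drop r := by
  induction r with
  | zero => intro l h; simp
  | succ r ih =>
    intro l h
    cases l with
    | nil => simp at h
    | cons a l => simp_all [List.insertIdx_succ_cons]

-- sortedness of the inserted list
theorem pvInsert_sorted (l : List Int) (t : Int) (r : Nat) (hr : r ≤ l.length)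
    (hs : l.Pairwise (· ≤ ·))
    (h1 : ∀ i, i < r → ∀ h : i < l.length, l[i] ≤ t)
    (h2 : ∀ i, r ≤ i → ∀ h : i < l.length, t < l[i]) :
    (l.insertIdx r t).Pairwise (· ≤ ·) := by
  rw [pvInsertIdx_eq t r l hr, List.pairwise_append]
  refine ⟨hs.sublist (List.take_sublist _ _), ?_, ?_⟩
  · rw [List.pairwise_cons]
    refine ⟨?_, hs.sublist (List.drop_sublist _ _)⟩
    intro a ha
    obtain ⟨i, hi, hget⟩ := List.mem_iff_getElem.mp ha
    have hil : r + i < l.length := by have := hi; simp [List.length_drop] at this; omega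
    have : a = l[r + i] := by rw [← hget]; simp [List.getElem_drop]
    rw [this]
    exact le_of_lt (h2 (r + i) (by omega) hil)
  · intro a ha b hb
    obtain ⟨i, hi, hget⟩ := List.mem_iff_getElem.mp ha
    have hir : i < r := by have := hi; simp [List.length_take] at this; omega
    have hil : i < l.length := by have := hi; simp [List.length_take] at this; omega
    have hai : a = l[i] := by rw [← hget]; simp [List.getElem_take]
    have hat : a ≤ t := by rw [hai]; exact h1 i hir hil
    rcases List.mem_cons.mp hb with rfl | hb'
    · exact hat
    · obtain ⟨j, hj, hgetb⟩ := List.mem_iff_getElem.mp hb'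
      have hjl : r + j < l.length := by have := hj; simp [List.length_drop] at this; omega
      have : b = l[r + j] := by rw [← hgetb]; simp [List.getElem_drop]
      rw [this]
      exact le_trans hat (le_of_lt (h2 (r + j) (by omega) hjl))

-- the main loop invariant: B's allowed list is a sorted permutation of A's
theorem pvMain (windowLength maxInWindow : Int) :
    ∀ (ts : List Int) (res : List Bool) (al sal : List Int),
      al.Perm sal → sal.Pairwise (· ≤ ·) →
      (ts.foldl
        (fun (st : List Bool × List Int) timestamp =>
          let count : Int :=
            st.2.foldl (fun c allowed_time =>
              if allowed_time ≥ timestamp - windowLength + 1 then c + 1 else c) 0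
          if count < maxInWindow then (st.1 ++ [true], st.2 ++ [timestamp])
          else (st.1 ++ [false], st.2)) (res, al)).1
      =
      (ts.foldl
        (fun (st : List Bool × List Int) t =>
          let thr := t - windowLength + 1
          let lo := pvBisectLeft st.2 thr st.2.length 0 st.2.length
          if ((st.2.length : Int) - (lo : Int)) < maxInWindow then
            (st.1 ++ [true], st.2.insertIdx (pvBisectRight st.2 t st.2.length 0 st.2.length) t)
          else (st.1 ++ [false], st.2)) (res, sal)).1 := by
  intro ts
  induction ts with
  | nil => intro res al sal _ _; simp
  | cons t ts ih =>
    intro res al sal hperm hsort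
    simp only [List.foldl_cons]
    set thr := t - windowLength + 1 with hthr
    have hbl := pvBisectLeft_spec sal thr hsort sal.length 0 sal.length (by omega) (by omega) le_rfl
      (by intro i hi; omega) (by intro i hi hil; omega)
    obtain ⟨_, hblle, hbl1, hbl2⟩ := hbl
    set lo := pvBisectLeft sal thr sal.length 0 sal.length with hlo
    have hcntP : sal.countP (fun a => decide (a < thr)) = lo := by
      apply pvCount_of_split _ _ _ hblle
      · intro i hi h; have := hbl1 i hi; rw [pvGetD_eq sal i h] at this; simpa using this
      · intro i hi h; have := hbl2 i hi h; rw [pvGetD_eq sal i h] at this; simpa using this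
    have hsum : sal.length = sal.countP (fun a => decide (a < thr))
        + sal.countP (fun a => decide (a ≥ thr)) := by
      simpa using List.length_eq_countP_add_countP (p := fun a => decide (a < thr)) (l := sal)
    have hcntA : al.countP (fun a => decide (a ≥ thr)) = sal.length - lo := by
      rw [hperm.countP_eq]; omega
    have hcount : al.foldl (fun c a => if a ≥ thr then c + 1 else c) (0 : Int)
        = (sal.length : Int) - (lo : Int) := by
      rw [pvCountFold thr al 0, hcntA]
      push_cast [Nat.cast_sub hblle]
      ring
    by_cases hbranch : (sal.length : Int) - (lo : Int) < maxInWindow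
    · have hbr := pvBisectRight_spec sal t hsort sal.length 0 sal.length (by omega) (by omega) le_rfl
        (by intro i hi; omega) (by intro i hi hil; omega)
      obtain ⟨_, hbrle, hbr1, hbr2⟩ := hbr
      set r := pvBisectRight sal t sal.length 0 sal.length with hr
      have hperm2 : (al ++ [t]).Perm (sal.insertIdx r t) :=
        (List.perm_append_singleton t al).trans
          ((hperm.cons t).trans (List.perm_insertIdx t sal hbrle).symm)
      have hsort2 : (sal.insertIdx r t).Pairwise (· ≤ ·) := by
        apply pvInsert_sorted sal t r hbrle hsort
        · intro i hi h; have := hbr1 i hi; rw [pvGetD_eq sal i h] at this; exact this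
        · intro i hi h; have := hbr2 i hi h; rw [pvGetD_eq sal i h] at this; omega
      have hstep := ih (res ++ [true]) (al ++ [t]) (sal.insertIdx r t) hperm2 hsort2
      simp only [hcount, hbranch, if_true]
      exact hstep
    · have hstep := ih (res ++ [false]) al sal hperm hsort
      simp only [hcount, hbranch, if_false]
      exact hstep

-- ===== VERDICT (by name: the statement is the Claim_ definition above) =====
theorem rateLimiter_spec : Claim_equal_rateLimiter := by
  intro ts w m _
  unfold Spec_rateLimiter rateLimiter rateLimiter_alt
  exact pvMain w m ts [] [] [] (List.Perm.refl _) List.Pairwise.nil
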